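-- pv_equiv track=rewrite | github.com/mathiscalonnec/Fantom_opera_IA | test_fantom.py | find_min_and_reduce_predictions
-- ===== SOURCE A (Python) =====
-- def find_min_and_reduce_predictions(predictions, depth):
--     new_pred = []
--     min_score = 100
--
--     for pred in predictions:
--         if pred[depth]["score"] < min_score:
--             min_score = pred[depth]["score"]
--
--     for pred in predictions:
--         if pred[depth]["score"] == min_score:
--             new_pred.append(pred)
--
--     return new_pred
-- ===== SOURCE B (Python) =====
-- def find_min_and_reduce_predictions(predictions, depth):
--     # single pass: track current min and its predictions together
--     min_score = 100
--     new_pred = []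
--     for pred in predictions:
--         s = pred[depth]["score"]
--         if s < min_score:
--             min_score = s
--             new_pred = [pred]
--         elif s == min_score:
--             new_pred.append(pred)
--     return new_pred
-- ===== Notes on version B (the rewrite author's own statement) =====
-- stated objective: alternative
-- what changed: Replaces A's two-pass scheme (one scan to find the minimum score, a second scan to collect matches) with a single pass that maintains the running minimum together with the list of predictions achieving it, resetting the list whenever a smaller score appears.
import Mathlib
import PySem

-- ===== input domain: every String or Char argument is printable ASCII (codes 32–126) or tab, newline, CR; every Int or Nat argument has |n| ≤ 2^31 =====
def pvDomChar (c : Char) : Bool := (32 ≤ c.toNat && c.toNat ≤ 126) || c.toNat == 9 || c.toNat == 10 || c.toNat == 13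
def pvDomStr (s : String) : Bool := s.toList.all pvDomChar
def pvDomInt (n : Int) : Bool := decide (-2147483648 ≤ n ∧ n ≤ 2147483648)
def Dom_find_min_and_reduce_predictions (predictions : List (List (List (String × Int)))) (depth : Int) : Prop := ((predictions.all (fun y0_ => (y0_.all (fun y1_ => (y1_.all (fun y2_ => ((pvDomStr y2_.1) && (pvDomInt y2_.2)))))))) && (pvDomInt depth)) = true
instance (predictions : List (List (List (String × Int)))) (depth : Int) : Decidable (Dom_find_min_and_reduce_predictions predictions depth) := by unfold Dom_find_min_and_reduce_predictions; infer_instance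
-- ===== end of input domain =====

-- B is a single pass that maintains the running minimum together with its predictions,
-- instead of A's two separate scans (objective: alternative decomposition, same cost).

-- pred[depth]["score"]: used by both ports; under Pre_ the index and key always exist,
-- so the getD defaults are never the value actually used.
def pvScore (depth : Int) (pred : List (List (String × Int))) : Int :=
  ((((PySem.List.pyGet? pred depth).getD []).lookup "score").getD 0)

-- ===== PORT A =====
def find_min_and_reduce_predictions (predictions : List (List (List (String × Int)))) (depth : Int) : List (List (List (String × Int))) :=
  let min_score : Int :=
    predictions.foldl (fun m pred =>
      if pvScore depth pred < m then pvScore depth pred else m) 100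
  predictions.foldl (fun acc pred =>
    if pvScore depth pred = min_score then acc ++ [pred] else acc) []

-- ===== PORT B =====
def find_min_and_reduce_predictions_alt (predictions : List (List (List (String × Int)))) (depth : Int) : List (List (List (String × Int))) :=
  (predictions.foldl (fun (st : Int × List (List (List (String × Int)))) pred =>
      let s := pvScore depth pred
      if s < st.1 then (s, [pred])
      else if s = st.1 then (st.1, st.2 ++ [pred])
      else st) (100, [])).2

-- ===== PRECONDITION & SPEC =====
-- Pre_: Python A raises IndexError/KeyError unless, for every prediction, depth is a
-- valid index and the dict there has a "score" key; exactly those inputs are admitted.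
def Pre_find_min_and_reduce_predictions (predictions : List (List (List (String × Int)))) (depth : Int) : Prop :=
  ∀ pred ∈ predictions,
    ((PySem.List.pyGet? pred depth).bind (fun d => d.lookup "score")).isSome = true

instance (predictions : List (List (List (String × Int)))) (depth : Int) : Decidable (Pre_find_min_and_reduce_predictions predictions depth) := by
  unfold Pre_find_min_and_reduce_predictions; infer_instance

def pvWitness_find_min_and_reduce_predictions : (List (List (List (String × Int)))) × Int :=
  ([[[("score", 3)]], [[("score", 2)]]], 0)

def Spec_find_min_and_reduce_predictions (predictions : List (List (List (String × Int)))) (depth : Int) (out : List (List (List (String × Int)))) : Prop :=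
  out = find_min_and_reduce_predictions_alt predictions depth

instance (predictions : List (List (List (String × Int)))) (depth : Int) (out : List (List (List (String × Int)))) : Decidable (Spec_find_min_and_reduce_predictions predictions depth out) := by
  unfold Spec_find_min_and_reduce_predictions; infer_instance

-- ===== CLAIM =====
def Claim_equal_find_min_and_reduce_predictions : Prop := ∀ (predictions : List (List (List (String × Int)))) (depth : Int), Dom_find_min_and_reduce_predictions predictions depth → Pre_find_min_and_reduce_predictions predictions depth → Spec_find_min_and_reduce_predictions predictions depth (find_min_and_reduce_predictions predictions depth)

-- ===== LEMMAS AND PROOFS =====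

-- proof-only abbreviation for A's first loop (the running minimum)
def pvMF (depth : Int) (m : Int) (l : List (List (List (String × Int)))) : Int :=
  l.foldl (fun m pred => if pvScore depth pred < m then pvScore depth pred else m) m

-- the running minimum never increases
theorem pvMF_le (depth : Int) (l : List (List (List (String × Int)))) (m : Int) :
    pvMF depth m l ≤ m := by
  induction l generalizing m with
  | nil => simp [pvMF]
  | cons p t ih =>
    show pvMF depth (if pvScore depth p < m then pvScore depth p else m) t ≤ m
    split_ifs with h
    · exact le_trans (ih _) (le_of_lt h)
    · exact ih m

-- invariant of B's single pass, stated against A's min-fold and a filter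
theorem pvLoop_inv (depth : Int) (l : List (List (List (String × Int)))) (m : Int)
    (r : List (List (List (String × Int)))) :
    l.foldl (fun st pred =>
      let s := pvScore depth pred
      if s < st.1 then (s, [pred])
      else if s = st.1 then (st.1, st.2 ++ [pred])
      else st) (m, r)
    = (pvMF depth m l,
       (if pvMF depth m l = m then r else [])
         ++ l.filter (fun pred => pvScore depth pred = pvMF depth m l)) := by
  induction l generalizing m r with
  | nil => simp [pvMF]
  | cons p t ih =>
    have hcons : ∀ m0, pvMF depth m0 (p :: t)
        = pvMF depth (if pvScore depth p < m0 then pvScore depth p else m0) t := fun _ => rfl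
    simp only [List.foldl_cons, List.filter_cons, hcons]
    by_cases h1 : pvScore depth p < m
    · simp only [if_pos h1]
      rw [ih (pvScore depth p) [p]]
      have hle := pvMF_le depth t (pvScore depth p)
      have hne : ¬ pvMF depth (pvScore depth p) t = m := by omega
      rw [if_neg hne]
      by_cases h2 : pvScore depth p = pvMF depth (pvScore depth p) t
      · have h2s : pvMF depth (pvScore depth p) t = pvScore depth p := h2.symm
        simp [h2s]
      · have h2s : ¬ pvMF depth (pvScore depth p) t = pvScore depth p := fun hh => h2 hh.symm
        simp [h2, h2s]
    · simp only [if_neg h1]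
      by_cases h2 : pvScore depth p = m
      · simp only [if_pos h2]
        rw [ih m (r ++ [p])]
        by_cases h3 : pvMF depth m t = m
        · have h4 : pvScore depth p = pvMF depth m t := by omega
          simp [h3, h4, List.append_assoc]
        · have h4 : ¬ pvScore depth p = pvMF depth m t := by omega
          simp [h3, h4]
      · simp only [if_neg h2]
        rw [ih m r]
        have hle := pvMF_le depth t m
        have h4 : ¬ pvScore depth p = pvMF depth m t := by omega
        simp [h4]

-- ===== VERDICT =====
theorem find_min_and_reduce_predictions_spec : Claim_equal_find_min_and_reduce_predictions := by
  intro predictions depth _ _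
  unfold Spec_find_min_and_reduce_predictions
  unfold find_min_and_reduce_predictions find_min_and_reduce_predictions_alt
  rw [pvLoop_inv]
  have hMF : List.foldl (fun m pred => if pvScore depth pred < m then pvScore depth pred else m)
      100 predictions = pvMF depth 100 predictions := rfl
  rw [PySem.List.foldl_append_ite_eq_filter, hMF]
  split_ifs <;> simp
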